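-- pv_equiv track=rewrite | github.com/trbarbour/NixOS-boot-image | pre_nixos/storage_cleanup.py | _is_allowed_returncode
-- ===== SOURCE A (Python) =====
-- from typing import Callable, Iterable, List, Mapping, Sequence, Set, Tuple
--
-- _ALLOWED_NONZERO_EXIT_CODES: Mapping[Tuple[str, ...], Set[int]] = {
--     ("sgdisk", "--zap-all"): {2},
--     ("partprobe",): {1},
-- }
--
-- def _is_allowed_returncode(cmd: Sequence[str], returncode: int) -> bool:
--     """Return ``True`` when *returncode* is acceptable for *cmd*."""
--
--     if returncode == 0:
--         return True
--     for prefix_length in range(len(cmd), 0, -1):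
--         key = tuple(cmd[:prefix_length])
--         allowed = _ALLOWED_NONZERO_EXIT_CODES.get(key)
--         if allowed and returncode in allowed:
--             return True
--     return False
-- ===== SOURCE B (Python) =====
-- _ALLOWED_NONZERO_EXIT_CODES = {
--     ("sgdisk", "--zap-all"): {2},
--     ("partprobe",): {1},
-- }
--
--
-- def _is_allowed_returncode(cmd, returncode):
--     """Return ``True`` when *returncode* is acceptable for *cmd*."""
--
--     return (
--         returncode == 0
--         or (returncode == 2 and list(cmd[:2]) == ["sgdisk", "--zap-all"])
--         or (returncode == 1 and list(cmd[:1]) == ["partprobe"])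
--     )
-- ===== Notes on version B (the rewrite author's own statement) =====
-- stated objective: faster
-- what changed: B replaces A's loop over every prefix of cmd (longest first, building and hashing a prefix tuple per length for a dict lookup) with a loop-free closed-form boolean that inlines the two fixed table entries as direct returncode/prefix tests.
import Mathlib
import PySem

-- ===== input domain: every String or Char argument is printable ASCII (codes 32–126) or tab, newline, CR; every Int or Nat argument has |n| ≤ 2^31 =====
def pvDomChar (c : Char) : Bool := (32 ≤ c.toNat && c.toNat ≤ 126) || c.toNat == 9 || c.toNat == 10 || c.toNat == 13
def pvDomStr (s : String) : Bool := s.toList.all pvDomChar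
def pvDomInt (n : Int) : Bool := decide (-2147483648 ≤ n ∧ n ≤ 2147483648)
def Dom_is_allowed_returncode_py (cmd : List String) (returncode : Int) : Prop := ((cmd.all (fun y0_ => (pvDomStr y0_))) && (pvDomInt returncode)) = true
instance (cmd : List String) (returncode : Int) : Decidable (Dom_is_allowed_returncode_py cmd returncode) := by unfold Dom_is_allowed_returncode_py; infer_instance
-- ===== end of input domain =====

-- B replaces A's loop over all prefixes of cmd (with dict lookups) by a loop-free closed-form
-- boolean inlining the two fixed table entries: simpler, no loop.


-- ===== PORT A =====
-- _ALLOWED_NONZERO_EXIT_CODES: dict from key tuple to set of allowed exit codes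
def pvAllowedNonzeroDict : PySem.Dict (List String) (PySem.Set Int) :=
  PySem.Dict.ofList [(["sgdisk", "--zap-all"], [2]), (["partprobe"], [1])]

-- 'for prefix_length in range(len(cmd), 0, -1): … return True on first hit … return False' is List.any
def is_allowed_returncode_py (cmd : List String) (returncode : Int) : Bool :=
  if returncode == 0 then true
  else
    (PySem.List.pyRange (cmd.length : Int) 0 (-1)).any (fun prefix_length =>
      -- key = tuple(cmd[:prefix_length]); allowed = dict.get(key); if allowed and returncode in allowed
      match pvAllowedNonzeroDict.get? (PySem.List.slice cmd none (some prefix_length)) with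
      | some allowed => !allowed.isEmpty && allowed.contains returncode
      | none => false)

-- ===== PORT B =====
-- straight-line closed form: the two table entries inlined as direct tests
def is_allowed_returncode_py_alt (cmd : List String) (returncode : Int) : Bool :=
  (returncode == 0)
  || ((returncode == 2) && (PySem.List.slice cmd none (some 2) == ["sgdisk", "--zap-all"]))
  || ((returncode == 1) && (PySem.List.slice cmd none (some 1) == ["partprobe"]))

-- ===== PRECONDITION & SPEC =====
def Spec_is_allowed_returncode_py (cmd : List String) (returncode : Int) (out : Bool) : Prop := out = is_allowed_returncode_py_alt cmd returncode
instance (cmd : List String) (returncode : Int) (out : Bool) : Decidable (Spec_is_allowed_returncode_py cmd returncode out) := by unfold Spec_is_allowed_returncode_py; infer_instance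

-- ===== CLAIM (what is proved, stated in full; the proofs are below) =====
def Claim_equal_is_allowed_returncode_py : Prop := ∀ (cmd : List String) (returncode : Int), Dom_is_allowed_returncode_py cmd returncode → Spec_is_allowed_returncode_py cmd returncode (is_allowed_returncode_py cmd returncode)

-- ===== LEMMAS AND PROOFS =====

-- if some prefix of xs equals k, then the prefix of length k.length equals k
theorem pv_take_eq_of_take_eq (xs k : List String) (m : Nat) (h : xs.take m = k) :
    xs.take k.length = k := by
  have hlen : k.length ≤ m := by
    have := congrArg List.length h
    simp [List.length_take] at this
    omega
  calc xs.take k.length = (xs.take m).take k.length := by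
        rw [List.take_take]; congr 1; omega
    _ = k := by rw [h]; exact List.take_of_length_le (le_refl _)

theorem pv_len_le_of_take_eq (xs k : List String) (h : xs.take k.length = k) :
    k.length ≤ xs.length := by
  have := congrArg List.length h
  simp [List.length_take] at this
  omega

-- cmd[:x] for 0 ≤ x is List.take
theorem pv_slice_nonneg (xs : List String) (x : Int) (hx : 0 ≤ x) :
    PySem.List.slice xs none (some x) = xs.take x.toNat := by
  have : x = ((x.toNat : Nat) : Int) := by omega
  rw [this, PySem.List.slice_to_natCast, Int.toNat_natCast]

theorem is_allowed_returncode_py_spec : Claim_equal_is_allowed_returncode_py := by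
  intro cmd rc _
  unfold Spec_is_allowed_returncode_py is_allowed_returncode_py is_allowed_returncode_py_alt
  by_cases h0 : rc == 0
  · simp [h0]
  · simp only [h0, Bool.false_eq_true, if_false, Bool.false_or]
    rw [Bool.eq_iff_iff]
    simp only [List.any_eq_true, PySem.List.mem_pyRange_neg_one]
    have hdict : pvAllowedNonzeroDict
        = PySem.Dict.mk [(["sgdisk", "--zap-all"], [2]), (["partprobe"], [1])] := by decide
    rw [hdict]
    simp only [PySem.Dict.get?_mk_cons]
    rw [pv_slice_nonneg cmd 2 (by norm_num), pv_slice_nonneg cmd 1 (by norm_num)]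
    constructor
    · rintro ⟨x, ⟨hx0, hxn⟩, hm⟩
      rw [pv_slice_nonneg cmd x (by omega)] at hm
      by_cases h1 : (["sgdisk", "--zap-all"] == cmd.take x.toNat) = true
      · have h1' : cmd.take x.toNat = ["sgdisk", "--zap-all"] := (beq_iff_eq.mp h1).symm
        have htake := pv_take_eq_of_take_eq cmd _ _ h1'
        simp only [h1, if_true] at hm
        simp only [List.length_cons, List.length_nil] at htake
        simp at hm
        simp [htake, hm]
      · by_cases h2 : (["partprobe"] == cmd.take x.toNat) = true
        · have h2' : cmd.take x.toNat = ["partprobe"] := (beq_iff_eq.mp h2).symm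
          have htake := pv_take_eq_of_take_eq cmd _ _ h2'
          simp only [h1, h2, if_true] at hm
          simp only [List.length_cons, List.length_nil] at htake
          simp at hm
          simp [htake, hm]
        · simp only [h1, h2] at hm
          simp [PySem.Dict.get?] at hm
    · intro h
      rw [Bool.or_eq_true, Bool.and_eq_true, Bool.and_eq_true] at h
      rcases h with ⟨hrc, hpre⟩ | ⟨hrc, hpre⟩
      · have hpre' : cmd.take 2 = ["sgdisk", "--zap-all"] := by
          simpa using beq_iff_eq.mp hpre
        have hlen : 2 ≤ cmd.length := by
          have := pv_len_le_of_take_eq cmd ["sgdisk", "--zap-all"] (by simpa using hpre')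
          simpa using this
        refine ⟨2, ⟨by norm_num, by exact_mod_cast hlen⟩, ?_⟩
        rw [pv_slice_nonneg cmd 2 (by norm_num)]
        simp [hpre', beq_iff_eq.mp hrc]
      · have hpre' : cmd.take 1 = ["partprobe"] := by
          simpa using beq_iff_eq.mp hpre
        have hlen : 1 ≤ cmd.length := by
          have := pv_len_le_of_take_eq cmd ["partprobe"] (by simpa using hpre')
          simpa using this
        refine ⟨1, ⟨by norm_num, by exact_mod_cast hlen⟩, ?_⟩
        rw [pv_slice_nonneg cmd 1 (by norm_num)]
        simp [hpre', beq_iff_eq.mp hrc]
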